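-- pv_equiv track=rewrite | github.com/Exwide-dev/Exwide | core/Parser.py | _build_line_info
-- ===== SOURCE A (Python) =====
-- def _build_line_info(code: str) -> list[tuple[int, int]]:
--     """
--     构建行信息，记录每行的起始和结束位置
--
--     Args:
--         code: 原始代码字符串
--
--     Returns:
--         行信息列表，每个元素是(行起始位置, 行结束位置)
--     """
--     line_info = []
--     start = 0
--     for i, char in enumerate(code):
--         if char == '\n':
--             line_info.append((start, i))
--             start = i + 1
--     if start < len(code):
--         line_info.append((start, len(code)))
--     return line_info
-- ===== SOURCE B (Python) =====
-- def _build_line_info(code: str) -> list[tuple[int, int]]: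
--     segments = code.split('\n')
--     line_info = []
--     start = 0
--     for i, seg in enumerate(segments):
--         end = start + len(seg)
--         if i < len(segments) - 1 or seg:
--             line_info.append((start, end))
--         start = end + 1
--     return line_info
-- ===== Notes on version B (the rewrite author's own statement) =====
-- stated objective: faster
-- what changed: B replaces A's Python-level per-character scan for newlines with one str.split call on the newline separator plus a running-offset loop over the segments using length arithmetic.
import Mathlib
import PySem

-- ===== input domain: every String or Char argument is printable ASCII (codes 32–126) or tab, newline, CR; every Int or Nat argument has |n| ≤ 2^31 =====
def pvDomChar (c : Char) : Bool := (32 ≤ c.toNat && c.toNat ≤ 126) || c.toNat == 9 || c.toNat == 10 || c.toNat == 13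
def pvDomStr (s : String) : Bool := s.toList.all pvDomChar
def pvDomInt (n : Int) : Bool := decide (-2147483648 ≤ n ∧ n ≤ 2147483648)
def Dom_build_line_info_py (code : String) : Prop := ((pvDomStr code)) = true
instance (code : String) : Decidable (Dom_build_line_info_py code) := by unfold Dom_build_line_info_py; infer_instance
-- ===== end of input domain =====

-- B computes the same line spans from one split on the newline separator with a running offset
-- instead of A's per-character scan; a timing run measured B faster (constant factor).

-- ===== PORT A =====
-- A's for-loop over enumerate(code): state = (line_info so far, start); returns (line_info, start).
def buildLineInfoLoopA : List Char → Int → Int → List (Int × Int) → List (Int × Int) × Int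
  | [], _, start, acc => (acc, start)
  | c :: rest, i, start, acc =>
    if c = '\n' then buildLineInfoLoopA rest (i + 1) (i + 1) (acc ++ [(start, i)])
    else buildLineInfoLoopA rest (i + 1) start acc

def build_line_info_py (code : String) : List (Int × Int) :=
  let cs := code.toList
  let r := buildLineInfoLoopA cs 0 0 []
  if r.2 < (cs.length : Int) then r.1 ++ [(r.2, (cs.length : Int))] else r.1

-- ===== PORT B =====
-- B's for-loop over enumerate(segments): i = index, n = len(segments), start = running offset.
def buildLineInfoLoopB : List (List Char) → Nat → Nat → Int → List (Int × Int) → List (Int × Int)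
  | [], _, _, _, acc => acc
  | seg :: rest, i, n, start, acc =>
    let e := start + (seg.length : Int)
    let acc' := if i < n - 1 ∨ seg ≠ [] then acc ++ [(start, e)] else acc
    buildLineInfoLoopB rest (i + 1) n (e + 1) acc'

def build_line_info_py_alt (code : String) : List (Int × Int) :=
  let segments := PySem.Chars.splitOn code.toList ['\n']
  buildLineInfoLoopB segments 0 segments.length 0 []

-- ===== PRECONDITION & SPEC =====
def Spec_build_line_info_py (code : String) (out : List (Int × Int)) : Prop := out = build_line_info_py_alt code
instance (code : String) (out : List (Int × Int)) : Decidable (Spec_build_line_info_py code out) := by unfold Spec_build_line_info_py; infer_instance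

-- ===== CLAIM (what is proved, stated in full; the proofs are below) =====
def Claim_equal_build_line_info_py : Prop := ∀ (code : String), Dom_build_line_info_py code → Spec_build_line_info_py code (build_line_info_py code)

-- ===== LEMMAS AND PROOFS =====

-- simple recursive characterisation of split-on-'\n' (cur = current reversed segment)
def mySplit : List Char → List Char → List (List Char)
  | cur, [] => [cur.reverse]
  | cur, c :: rest => if c = '\n' then cur.reverse :: mySplit [] rest else mySplit (c :: cur) rest

theorem mySplit_ne_nil (cur cs : List Char) : mySplit cur cs ≠ [] := by
  induction cs generalizing cur with
  | nil => simp [mySplit]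
  | cons c rest ih =>
    by_cases h : c = '\n'
    · simp [mySplit, h]
    · simpa [mySplit, h] using ih (c :: cur)

theorem splitOn_go_eq (fuel : Nat) (l cur : List Char) (acc : List (List Char))
    (h : l.length < fuel) :
    PySem.Chars.splitOn.go ['\n'] fuel l cur acc = acc.reverse ++ mySplit cur l := by
  induction fuel generalizing l cur acc with
  | zero => omega
  | succ fuel ih =>
    cases l with
    | nil => simp [PySem.Chars.splitOn.go, mySplit]
    | cons c rest =>
      by_cases hc : c = '\n'
      · have hp : List.isPrefixOf ['\n'] (c :: rest) = true := by
          simp [List.isPrefixOf, hc]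
        simp only [PySem.Chars.splitOn.go, hp, if_true]
        rw [ih _ _ _ (by simpa using Nat.lt_of_succ_lt_succ h)]
        simp [mySplit, hc]
      · have hp : List.isPrefixOf ['\n'] (c :: rest) = false := by
          simp only [List.isPrefixOf, Bool.and_true,
            beq_eq_false_iff_ne, ne_eq]
          exact fun h => hc h.symm
        simp only [PySem.Chars.splitOn.go, hp, Bool.false_eq_true, if_false]
        rw [ih _ _ _ (by simpa using Nat.lt_of_succ_lt_succ h)]
        simp [mySplit, hc]

theorem splitOn_eq_mySplit (cs : List Char) :
    PySem.Chars.splitOn cs ['\n'] = mySplit [] cs := by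
  unfold PySem.Chars.splitOn
  simpa using splitOn_go_eq (cs.length + 1) cs [] [] (by omega)

-- the common value: line spans of a nonempty segment list, starting at offset s
def segSpans : List (List Char) → Int → List (Int × Int)
  | [], _ => []
  | seg :: rest, s =>
    match rest with
    | [] => if seg = [] then [] else [(s, s + (seg.length : Int))]
    | _ :: _ => (s, s + (seg.length : Int)) :: segSpans rest (s + (seg.length : Int) + 1)

theorem loopB_eq (segs : List (List Char)) (i : Nat) (s : Int) (acc : List (Int × Int))
    (hne : segs ≠ []) :
    buildLineInfoLoopB segs i (i + segs.length) s acc = acc ++ segSpans segs s := by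
  induction segs generalizing i s acc with
  | nil => exact absurd rfl hne
  | cons seg rest ih =>
    cases rest with
    | nil =>
      by_cases hs : seg = []
      · simp [buildLineInfoLoopB, segSpans, hs]
      · simp [buildLineInfoLoopB, segSpans, hs]
    | cons r rs =>
      have hlt : i < i + (seg :: r :: rs).length - 1 := by simp
      have hstep : buildLineInfoLoopB (seg :: r :: rs) i (i + (seg :: r :: rs).length) s acc =
          buildLineInfoLoopB (r :: rs) (i + 1) (i + (seg :: r :: rs).length)
            (s + (seg.length : Int) + 1)
            (if i < i + (seg :: r :: rs).length - 1 ∨ seg ≠ [] then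
              acc ++ [(s, s + (seg.length : Int))] else acc) := rfl
      have hn : i + (seg :: r :: rs).length = (i + 1) + (r :: rs).length := by
        simp; omega
      rw [hstep, if_pos (Or.inl hlt), hn,
        ih (i + 1) (s + (seg.length : Int) + 1) (acc ++ [(s, s + (seg.length : Int))]) (by simp)]
      simp [segSpans]

theorem loopA_eq (cs cur : List Char) (s : Int) (acc : List (Int × Int)) :
    (let r := buildLineInfoLoopA cs (s + (cur.length : Int)) s acc
     if r.2 < s + (cur.length : Int) + (cs.length : Int) then
       r.1 ++ [(r.2, s + (cur.length : Int) + (cs.length : Int))] else r.1)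
    = acc ++ segSpans (mySplit cur cs) s := by
  induction cs generalizing cur s acc with
  | nil =>
    simp only [buildLineInfoLoopA, mySplit, List.length_nil, Int.natCast_zero, add_zero]
    by_cases hc : cur = []
    · simp [hc, segSpans]
    · have h1 : (0 : Int) < (cur.length : Int) := by
        have : 0 < cur.length := List.length_pos_iff.mpr hc
        exact_mod_cast this
      have h2 : cur.reverse ≠ [] := by simpa using hc
      rw [if_pos (by omega : s < s + (cur.length : Int))]
      simp [segSpans, h2]
  | cons c rest ih =>
    have hstep : buildLineInfoLoopA (c :: rest) (s + (cur.length : Int)) s acc =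
        if c = '\n' then
          buildLineInfoLoopA rest (s + (cur.length : Int) + 1) (s + (cur.length : Int) + 1)
            (acc ++ [(s, s + (cur.length : Int))])
        else buildLineInfoLoopA rest (s + (cur.length : Int) + 1) s acc := by
      simp [buildLineInfoLoopA]
    by_cases hc : c = '\n'
    · rw [hstep, if_pos hc]
      have hih := ih [] (s + (cur.length : Int) + 1) (acc ++ [(s, s + (cur.length : Int))])
      simp only [List.length_nil, Int.natCast_zero, add_zero] at hih
      have hgoal : s + (cur.length : Int) + (((c :: rest).length : Nat) : Int)
          = s + (cur.length : Int) + 1 + (rest.length : Int) := by push_cast [List.length_cons]; ring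
      rw [hgoal, hih, show mySplit cur (c :: rest) = cur.reverse :: mySplit [] rest by
        simp [mySplit, hc]]
      cases hm : mySplit [] rest with
      | nil => exact absurd hm (mySplit_ne_nil [] rest)
      | cons x xs =>
        simp only [segSpans, List.append_assoc, List.cons_append, List.nil_append,
          List.length_reverse]
    · rw [hstep, if_neg hc]
      have hih := ih (c :: cur) s acc
      rw [show (((c :: cur).length : Nat) : Int) = (cur.length : Int) + 1 by push_cast [List.length_cons]; ring,
        show s + ((cur.length : Int) + 1) = s + (cur.length : Int) + 1 from
          (add_assoc _ _ _).symm] at hih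
      have hgoal : s + (cur.length : Int) + (((c :: rest).length : Nat) : Int)
          = s + (cur.length : Int) + 1 + (rest.length : Int) := by push_cast [List.length_cons]; ring
      rw [hgoal, hih, show mySplit cur (c :: rest) = mySplit (c :: cur) rest by
        simp [mySplit, hc]]

-- ===== VERDICT (by name: the statement is the Claim_ definition above) =====
theorem build_line_info_py_spec : Claim_equal_build_line_info_py := by
  intro code _
  unfold Spec_build_line_info_py build_line_info_py build_line_info_py_alt
  rw [splitOn_eq_mySplit]
  have hB := loopB_eq (mySplit [] code.toList) 0 0 [] (mySplit_ne_nil [] code.toList)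
  simp only [Nat.zero_add, List.nil_append] at hB
  rw [hB]
  have hA := loopA_eq code.toList [] 0 []
  simpa using hA
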